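-- pv_equiv track=rewrite | github.com/TheTechromancer/password_stretcher | stretcher.py | group_chartypes
-- ===== SOURCE A (Python) =====
-- def group_chartypes(b):
--
--     group_map       = []
--     # [ ( chartype, (start,end) ), ... ]
--
--     start           = 0
--     end             = 0
--     group           = bytes()
--     prev_chartype   = 0
--     group_index     = 0
--
--     for index in range(len(b)):
--         chartype = get_chartype(b[index:index+1])
--
--         if not chartype & prev_chartype:
--             if start-end:
--                 group_map.append( (prev_chartype, (start,end)) )
--                 group_index += 1
--             start = index
--
--         end = index + 1
--         prev_chartype = int(chartype)
--
--     if start-end: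
--         group_map.append( (prev_chartype, (start,end)) )
--         group_index += 1
--
--     return group_map
--
-- def get_chartype(char):
--
--     if char.isalpha():
--         return 1
--     elif char.isdigit():
--         return 2
--     else:
--         return 4
-- ===== SOURCE B (Python) =====
-- def get_chartype(char):
--
--     if char.isalpha():
--         return 1
--     elif char.isdigit():
--         return 2
--     else:
--         return 4
--
--
-- def group_chartypes(b):
--     # Precompute the chartype of every position, then scan runs with two indices.
--     types = [get_chartype(b[i:i+1]) for i in range(len(b))]
--     out = []
--     i = 0
--     n = len(types)
--     while i < n:
--         j = i + 1
--         while j < n and types[j] == types[i]: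
--             j += 1
--         out.append((types[i], (i, j)))
--         i = j
--     return out
-- ===== Notes on version B (the rewrite author's own statement) =====
-- stated objective: alternative
-- what changed: Replaced A's single-pass state machine (prev_chartype/start/end sentinel state with a post-loop flush) by a precomputed chartype list scanned with a two-pointer run detector that emits each (type,(start,end)) chunk directly.
import Mathlib
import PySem

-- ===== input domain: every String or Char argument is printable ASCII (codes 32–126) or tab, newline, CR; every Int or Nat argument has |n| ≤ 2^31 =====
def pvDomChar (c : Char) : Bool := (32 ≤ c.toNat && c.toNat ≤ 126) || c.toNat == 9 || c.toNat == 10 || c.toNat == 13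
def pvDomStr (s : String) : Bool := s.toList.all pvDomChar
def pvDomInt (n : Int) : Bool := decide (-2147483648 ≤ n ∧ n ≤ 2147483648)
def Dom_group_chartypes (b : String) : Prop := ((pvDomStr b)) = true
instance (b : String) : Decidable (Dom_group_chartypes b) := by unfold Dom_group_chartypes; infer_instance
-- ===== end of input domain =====

-- B replaces A's prev_chartype/start/end state machine (sentinel seed + post-loop flush) by a
-- precomputed chartype list scanned with a two-pointer run detector (objective: alternative).

-- shared module helper: get_chartype (used by both A and B, as in the Python module)
def get_chartype (char : String) : Int :=
  if PySem.Str.strIsalpha char then 1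
  else if PySem.Str.strIsdigit char then 2
  else 4

-- ===== PORT A =====
-- literal transliteration of A's loop; the dead locals `group` and `group_index` are omitted
-- (they never affect the returned value). Python's `chartype & prev_chartype` is Int.land,
-- `if start-end:` is the nonzero test.
def group_chartypes (b : String) : List (Int × (Int × Int)) :=
  let st :=
    (PySem.List.pyRange 0 (PySem.Str.len b) 1).foldl
      (fun (st : List (Int × (Int × Int)) × Int × Int × Int) index =>
        let gm := st.1; let start := st.2.1; let e := st.2.2.1; let prev := st.2.2.2
        let chartype := get_chartype (PySem.Str.slice b (some index) (some (index + 1)))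
        if Int.land chartype prev = 0 then
          if start - e ≠ 0 then
            (gm ++ [(prev, (start, e))], index, index + 1, chartype)
          else
            (gm, index, index + 1, chartype)
        else
          (gm, start, index + 1, chartype))
      ([], 0, 0, 0)
  if st.2.1 - st.2.2.1 ≠ 0 then st.1 ++ [(st.2.2.2, (st.2.1, st.2.2.1))] else st.1

-- ===== PORT B =====
-- B's outer while loop = this recursion over the remaining chartype list; B's inner
-- `while j < n and types[j] == types[i]` scan = the takeWhile/dropWhile run measurement,
-- with `off` tracking the index i (= j of the previous round).
def pvChunks (off : Int) : List Int → List (Int × (Int × Int))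
  | [] => []
  | t :: rest =>
    let run := rest.takeWhile (· == t)
    (t, (off, off + 1 + run.length)) ::
      pvChunks (off + 1 + (run.length : Int)) (rest.dropWhile (· == t))
termination_by l => l.length
decreasing_by
  simpa using Nat.lt_succ_of_le (List.length_dropWhile_le _ _)

def group_chartypes_alt (b : String) : List (Int × (Int × Int)) :=
  let types :=
    (PySem.List.pyRange 0 (PySem.Str.len b) 1).map
      (fun i => get_chartype (PySem.Str.slice b (some i) (some (i + 1))))
  pvChunks 0 types

-- ===== PRECONDITION & SPEC =====
def Spec_group_chartypes (b : String) (out : List (Int × (Int × Int))) : Prop := out = group_chartypes_alt b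
instance (b : String) (out : List (Int × (Int × Int))) : Decidable (Spec_group_chartypes b out) := by unfold Spec_group_chartypes; infer_instance

-- ===== CLAIM (what is proved, stated in full; the proofs are below) =====
def Claim_equal_group_chartypes : Prop := ∀ (b : String), Dom_group_chartypes b → Spec_group_chartypes b (group_chartypes b)

-- ===== LEMMAS AND PROOFS =====

theorem get_chartype_cases (s : String) :
    get_chartype s = 1 ∨ get_chartype s = 2 ∨ get_chartype s = 4 := by
  unfold get_chartype; split_ifs <;> simp

theorem takeWhile_replicate_append {q p : Int} (k : Nat) (L : List Int) (h : q ≠ p) :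
    (List.replicate k p ++ q :: L).takeWhile (· == p) = List.replicate k p := by
  induction k with
  | zero => simp [h]
  | succ k ih => simp [List.replicate_succ, ih]

theorem dropWhile_replicate_append {q p : Int} (k : Nat) (L : List Int) (h : q ≠ p) :
    (List.replicate k p ++ q :: L).dropWhile (· == p) = q :: L := by
  induction k with
  | zero => simp [h]
  | succ k ih => simp [List.replicate_succ, ih]

theorem pvChunks_nil (s : Int) : pvChunks s [] = [] := by
  rw [pvChunks]

theorem pvChunks_replicate (p : Int) (s : Int) (k : Nat) (hk : 0 < k) :
    pvChunks s (List.replicate k p) = [(p, (s, s + k))] := by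
  cases k with
  | zero => omega
  | succ k =>
    rw [List.replicate_succ, pvChunks]
    simp [pvChunks_nil]
    ring

theorem pvChunks_replicate_append {q p : Int} (s : Int) (k : Nat) (hk : 0 < k)
    (L : List Int) (h : q ≠ p) :
    pvChunks s (List.replicate k p ++ q :: L) =
      (p, (s, s + k)) :: pvChunks (s + k) (q :: L) := by
  cases k with
  | zero => omega
  | succ k =>
    rw [List.replicate_succ, List.cons_append, pvChunks]
    rw [takeWhile_replicate_append k L h, dropWhile_replicate_append k L h]
    simp only [List.length_replicate]
    rw [show s + 1 + (k : Int) = s + ((k + 1 : Nat) : Int) by push_cast; ring]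

-- the step function of port A's fold, abstracted over the per-index chartype f
def pvStepA (f : Int → Int) (st : List (Int × (Int × Int)) × Int × Int × Int) (index : Int) :
    List (Int × (Int × Int)) × Int × Int × Int :=
  let gm := st.1; let start := st.2.1; let e := st.2.2.1; let prev := st.2.2.2
  let chartype := f index
  if Int.land chartype prev = 0 then
    if start - e ≠ 0 then
      (gm ++ [(prev, (start, e))], index, index + 1, chartype)
    else
      (gm, index, index + 1, chartype)
  else
    (gm, start, index + 1, chartype)

def pvFin (st : List (Int × (Int × Int)) × Int × Int × Int) : List (Int × (Int × Int)) :=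
  if st.2.1 - st.2.2.1 ≠ 0 then st.1 ++ [(st.2.2.2, (st.2.1, st.2.2.1))] else st.1

theorem land_self_ne {t : Int} (ht : t = 1 ∨ t = 2 ∨ t = 4) : Int.land t t ≠ 0 := by
  rcases ht with rfl | rfl | rfl <;> decide

theorem land_ne_zero_iff {t p : Int} (ht : t = 1 ∨ t = 2 ∨ t = 4)
    (hp : p = 0 ∨ p = 1 ∨ p = 2 ∨ p = 4) : Int.land t p ≠ 0 ↔ t = p ∧ p ≠ 0 := by
  rcases ht with rfl | rfl | rfl <;> rcases hp with rfl | rfl | rfl | rfl <;> decide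

-- Main invariant: running A's loop over indices i..i+m with a pending run of chartype p
-- covering positions s..i produces gm ++ the chunks of (that pending run ++ the rest).
theorem pvMain (f : Int → Int) (hf : ∀ j, f j = 1 ∨ f j = 2 ∨ f j = 4) :
    ∀ (m : Nat) (i : Int) (gm : List (Int × (Int × Int))) (s p : Int),
      (p = 0 ∨ p = 1 ∨ p = 2 ∨ p = 4) →
      ((p = 0 ∧ s = i) ∨ (p ≠ 0 ∧ s < i)) →
      pvFin ((PySem.List.pyRange i (i + m) 1).foldl (pvStepA f) (gm, s, i, p)) =
        gm ++ pvChunks s (List.replicate (i - s).toNat p ++ (PySem.List.pyRange i (i + m) 1).map f) := by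
  intro m
  induction m with
  | zero =>
    intro i gm s p hp hsi
    rw [show i + (0:Nat) = i by simp, PySem.List.pyRange_one_eq_nil le_rfl]
    rcases hsi with ⟨hp0, rfl⟩ | ⟨hpne, hlt⟩
    · simp [pvFin, pvChunks_nil]
    · have hk : 0 < (i - s).toNat := by omega
      simp only [List.foldl_nil, List.map_nil, List.append_nil]
      rw [pvChunks_replicate p s _ hk]
      have : s + ((i - s).toNat : Int) = i := by omega
      rw [this]
      simp [pvFin, show s - i ≠ 0 by omega]
  | succ m ih =>
    intro i gm s p hp hsi
    have hi : i < i + (m + 1 : Nat) := by push_cast; omega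
    rw [PySem.List.pyRange_one_cons hi]
    have harith : i + ((m + 1 : Nat) : Int) = (i + 1) + (m : Nat) := by push_cast; ring
    rw [harith]
    have ht := hf i
    have hfit : f i ≠ 0 := by rcases ht with h | h | h <;> simp [h]
    simp only [List.foldl_cons, List.map_cons]
    by_cases hland : Int.land (f i) p = 0
    · -- new run starts at i
      have htp : ¬ (f i = p ∧ p ≠ 0) := by
        rw [← land_ne_zero_iff ht hp]; simpa using hland
      have hstep : pvStepA f (gm, s, i, p) i =
          (if s - i = 0 then gm else gm ++ [(p, (s, i))], i, i + 1, f i) := by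
        simp [pvStepA, hland]
        split_ifs <;> rfl
      rw [hstep]
      rw [ih (i + 1) _ i (f i) (Or.inr ht) (Or.inr ⟨hfit, by omega⟩)]
      have h1 : ((i + 1) - i).toNat = 1 := by omega
      rcases hsi with ⟨hp0, rfl⟩ | ⟨hpne, hlt⟩
      · simp
      · have hk : 0 < (i - s).toNat := by omega
        have hne : f i ≠ p := fun h => htp ⟨h, hpne⟩
        rw [pvChunks_replicate_append s _ hk _ hne]
        have : s + ((i - s).toNat : Int) = i := by omega
        rw [this]
        simp [show ¬ (s - i = 0) by omega]
    · -- run continues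
      have htp : f i = p ∧ p ≠ 0 := (land_ne_zero_iff ht hp).mp hland
      have hstep : pvStepA f (gm, s, i, p) i = (gm, s, i + 1, p) := by
        simp [pvStepA, htp.1, land_self_ne (htp.1 ▸ ht)]
      rw [hstep]
      rcases hsi with ⟨hp0, _⟩ | ⟨hpne, hlt⟩
      · exact absurd hp0 htp.2
      rw [ih (i + 1) gm s p hp (Or.inr ⟨hpne, by omega⟩)]
      have h2 : ((i + 1) - s).toNat = (i - s).toNat + 1 := by omega
      rw [h2, List.replicate_succ']
      simp [htp.1]

-- ===== VERDICT (by name: the statement is the Claim_ definition above) =====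
theorem group_chartypes_spec : Claim_equal_group_chartypes := by
  intro b _
  unfold Spec_group_chartypes
  have hA : group_chartypes b =
      pvFin ((PySem.List.pyRange 0 (PySem.Str.len b) 1).foldl
        (pvStepA (fun i => get_chartype (PySem.Str.slice b (some i) (some (i + 1)))))
        ([], 0, 0, 0)) := rfl
  have hB : group_chartypes_alt b =
      pvChunks 0 ((PySem.List.pyRange 0 (PySem.Str.len b) 1).map
        (fun i => get_chartype (PySem.Str.slice b (some i) (some (i + 1))))) := rfl
  rw [hA, hB]
  have hlen : PySem.Str.len b = ((b.length : Nat) : Int) := by simp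
  have h := pvMain (fun i => get_chartype (PySem.Str.slice b (some i) (some (i + 1))))
    (fun _ => get_chartype_cases _) b.length 0 [] 0 0 (Or.inl rfl) (Or.inl ⟨rfl, rfl⟩)
  rw [hlen]
  simpa using h
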